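-- pv_equiv track=rewrite | github.com/ethanhollins/igtrader | Plans/IncomePro_CCI_SCALP/v1.1.1.py | prettyPrintTrigger
-- ===== SOURCE A (Python) =====
-- def prettyPrintTrigger(trigger):
-- 	per_line = 3
-- 	indent = 2
-- 	result = ''
-- 	items = list(trigger.items())
-- 	longest_str = max([len(i[0]) + len(str(i[1])) for i in items])
--
-- 	for i in range(len(items)):
-- 		if i % per_line == 0:
-- 			result += '\n{}'.format(' '*indent)
-- 		result += '\"{}\": {}, {}'.format(
-- 			items[i][0], str(items[i][1]),
-- 			' '*( longest_str - (len(items[i][0]) + len(str(items[i][1]))) ),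
-- 		)
-- 	return result
-- ===== SOURCE B (Python) =====
-- def prettyPrintTrigger(trigger):
--     items = list(trigger.items())
--     longest = max(len(k) + len(str(v)) for k, v in items)
--
--     def fmt(k, v):
--         s = str(v)
--         return '"{}": {}, {}'.format(k, s, ' ' * (longest - (len(k) + len(s))))
--
--     rows = []
--     start = 0
--     while start < len(items):
--         rows.append('\n  ' + ''.join(fmt(k, v) for k, v in items[start:start + 3]))
--         start += 3
--     return ''.join(rows)
-- ===== Notes on version B (the rewrite author's own statement) =====
-- stated objective: alternative
-- what changed: Replaces A's single index loop with an i % per_line == 0 boundary test by explicit row chunking: a while loop steps start by 3, builds each row as '\n ' plus the joined formatted slice items[start:start+3], and joins the rows.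
-- outside the precondition, e.g. on prettyPrintTrigger({}): A raises ValueError, B raises ValueError
import Mathlib
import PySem

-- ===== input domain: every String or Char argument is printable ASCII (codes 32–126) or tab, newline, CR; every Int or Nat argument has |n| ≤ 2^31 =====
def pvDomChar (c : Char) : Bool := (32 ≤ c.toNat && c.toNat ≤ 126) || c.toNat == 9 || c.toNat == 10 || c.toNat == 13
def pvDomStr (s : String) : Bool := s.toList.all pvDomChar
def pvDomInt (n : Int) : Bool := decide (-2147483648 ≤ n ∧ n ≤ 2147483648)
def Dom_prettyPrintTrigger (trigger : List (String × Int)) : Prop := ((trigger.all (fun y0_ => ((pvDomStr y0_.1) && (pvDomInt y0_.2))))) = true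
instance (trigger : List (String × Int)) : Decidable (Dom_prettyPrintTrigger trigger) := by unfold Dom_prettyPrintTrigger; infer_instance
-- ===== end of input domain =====

-- B replaces A's single index loop with a modulo test by recursive row chunking (take 3 / drop 3) — objective: a plainer decomposition, same cost.

-- shared helpers: len(k)+len(str(v)) and the '"{}": {}, {}' item format (identical expressions in both Pythons)
def pvLenItem (kv : String × Int) : Nat := kv.1.toList.length + (PySem.Int.toChars kv.2).length

def pvFmt (L : Nat) (kv : String × Int) : List Char :=
  '"' :: kv.1.toList ++ '"' :: ':' :: ' ' :: PySem.Int.toChars kv.2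
    ++ ',' :: ' ' :: List.replicate (L - pvLenItem kv) ' '

-- ===== PORT A =====
-- A's loop: for i in range(len(items)): if i % 3 == 0: result += '\n' + '  '; result += fmt(items[i])
def pvLoopA (L : Nat) : List (String × Int) → Nat → List Char → List Char
  | [], _, result => result
  | kv :: rest, i, result =>
      let result := if i % 3 == 0 then result ++ '\n' :: List.replicate 2 ' ' else result
      pvLoopA L rest (i + 1) (result ++ pvFmt L kv)

def prettyPrintTrigger (trigger : List (String × Int)) : String :=
  let items := trigger
  -- max([...]) raises ValueError on an empty dict; that input is outside Pre_, getD 0 is junk there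
  let longest := ((items.map pvLenItem).max?).getD 0
  String.ofList (pvLoopA longest items 0 [])

-- ===== PORT B =====
-- B's while loop: start at 0, append the row '\n  ' + join(fmt of items[start:start+3]), start += 3; join the rows
def pvRowsLoop (L : Nat) (items : List (String × Int)) (start : Nat) (rows : List (List Char)) : List (List Char) :=
  if start < items.length then
    pvRowsLoop L items (start + 3)
      (rows ++ ['\n' :: ' ' :: ' ' ::
        ((PySem.List.slice items (some (start : Int)) (some ((start : Int) + 3))).map (pvFmt L)).flatten])
  else rows
  termination_by items.length - start

def prettyPrintTrigger_alt (trigger : List (String × Int)) : String :=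
  let items := trigger
  let longest := ((items.map pvLenItem).max?).getD 0
  String.ofList (pvRowsLoop longest items 0 []).flatten

-- ===== PRECONDITION & SPEC =====
-- Pre_ excludes the empty dict, on which A (and B alike) raises ValueError via max() of an empty sequence.
def Pre_prettyPrintTrigger (trigger : List (String × Int)) : Prop := trigger ≠ []
instance (trigger : List (String × Int)) : Decidable (Pre_prettyPrintTrigger trigger) := by unfold Pre_prettyPrintTrigger; infer_instance

def pvWitness_prettyPrintTrigger : (List (String × Int)) := [("ab", 1), ("c", -23), ("de", 456), ("f", 7)]

def Spec_prettyPrintTrigger (trigger : List (String × Int)) (out : String) : Prop := out = prettyPrintTrigger_alt trigger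
instance (trigger : List (String × Int)) (out : String) : Decidable (Spec_prettyPrintTrigger trigger out) := by unfold Spec_prettyPrintTrigger; infer_instance

-- ===== CLAIM (what is proved, stated in full; the proofs are below) =====
def Claim_equal_prettyPrintTrigger : Prop := ∀ (trigger : List (String × Int)), Dom_prettyPrintTrigger trigger → Pre_prettyPrintTrigger trigger → Spec_prettyPrintTrigger trigger (prettyPrintTrigger trigger)

-- ===== LEMMAS AND PROOFS =====

-- proof-side helper: B's rows written as structural recursion on the remaining list
def pvRowsB (L : Nat) : List (String × Int) → List Char
  | [] => []
  | a :: rest =>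
      ('\n' :: ' ' :: ' ' :: (((a :: rest).take 3).map (pvFmt L)).flatten) ++ pvRowsB L (rest.drop 2)
  termination_by xs => xs.length
  decreasing_by simp

lemma pvRowsB_nil (L : Nat) : pvRowsB L [] = [] := by unfold pvRowsB; rfl

-- B's index-stepping loop produces exactly the rows of the remaining suffix
lemma pvRowsLoop_eq_rowsB (L : Nat) (items : List (String × Int)) :
    ∀ (n start : Nat) (rows : List (List Char)), items.length - start ≤ n →
      (pvRowsLoop L items start rows).flatten = rows.flatten ++ pvRowsB L (items.drop start) := by
  intro n
  induction n with
  | zero =>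
    intro start rows hn
    rw [pvRowsLoop]
    have h : ¬ start < items.length := by omega
    have hdrop : items.drop start = [] := List.drop_eq_nil_of_le (by omega)
    simp [h, hdrop, pvRowsB_nil]
  | succ n ih =>
    intro start rows hn
    rw [pvRowsLoop]
    by_cases h : start < items.length
    · simp only [h, if_true]
      rw [ih (start + 3) _ (by omega)]
      have hs : PySem.List.slice items (some (start : Int)) (some ((start : Int) + 3))
          = (items.drop start).take 3 := by
        have := PySem.List.slice_natCast_add items start 3
        push_cast at this
        exact this
      obtain ⟨a, rest, hd⟩ : ∃ a rest, items.drop start = a :: rest := by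
        cases hdrop : items.drop start with
        | nil => exfalso; have := List.drop_eq_nil_iff.mp hdrop; omega
        | cons a rest => exact ⟨a, rest, rfl⟩
      have hd3 : items.drop (start + 3) = rest.drop 2 := by
        have h33 : items.drop (start + 3) = (items.drop start).drop 3 := by
          rw [List.drop_drop]
        rw [h33, hd]; rfl
      rw [hd3]
      conv_rhs => rw [hd, pvRowsB.eq_def]
      rw [hs, hd]
      simp [List.map_take]
    · have hdrop : items.drop start = [] := List.drop_eq_nil_of_le (by omega)
      simp [h, hdrop, pvRowsB_nil]

-- A's loop started at a row boundary (i % 3 = 0) appends exactly B's row decomposition.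
lemma pvLoopA_eq_rowsB (L : Nat) : ∀ (n : Nat) (items : List (String × Int)) (s : Nat) (r : List Char),
    items.length ≤ n → s % 3 = 0 → pvLoopA L items s r = r ++ pvRowsB L items := by
  intro n
  induction n with
  | zero =>
    intro items s r hlen _
    have : items = [] := List.eq_nil_of_length_eq_zero (Nat.le_zero.mp hlen)
    subst this
    simp [pvLoopA, pvRowsB_nil]
  | succ n ih =>
    intro items s r hlen hs
    match items with
    | [] => simp [pvLoopA, pvRowsB_nil]
    | [a] =>
      rw [pvRowsB.eq_def]
      simp [pvLoopA, hs, pvRowsB_nil]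
    | [a, b] =>
      have h1 : (s + 1) % 3 ≠ 0 := by omega
      rw [pvRowsB.eq_def]
      simp [pvLoopA, hs, h1, pvRowsB_nil]
    | [a, b, c] =>
      have h1 : (s + 1) % 3 ≠ 0 := by omega
      have h2 : (s + 1 + 1) % 3 ≠ 0 := by omega
      rw [pvRowsB.eq_def]
      simp [pvLoopA, hs, h1, h2, pvRowsB_nil]
    | a :: b :: c :: d :: rest =>
      have h1 : (s + 1) % 3 ≠ 0 := by omega
      have h2 : (s + 1 + 1) % 3 ≠ 0 := by omega
      have h3 : (s + 1 + 1 + 1) % 3 = 0 := by omega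
      have hlen' : (d :: rest).length ≤ n := by simp at hlen ⊢; omega
      show pvLoopA L (b :: c :: d :: rest) (s + 1) _ = _
      show pvLoopA L (c :: d :: rest) (s + 1 + 1) _ = _
      show pvLoopA L (d :: rest) (s + 1 + 1 + 1) _ = _
      rw [ih (d :: rest) (s + 1 + 1 + 1) _ hlen' h3]
      conv_rhs => rw [pvRowsB.eq_def]
      simp [hs, h1, h2]

-- ===== VERDICT (by name: the statement is the Claim_ definition above) =====
theorem prettyPrintTrigger_spec : Claim_equal_prettyPrintTrigger := by
  intro trigger _ _
  show String.ofList (pvLoopA ((trigger.map pvLenItem).max?.getD 0) trigger 0 []) =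
    String.ofList (pvRowsLoop ((trigger.map pvLenItem).max?.getD 0) trigger 0 []).flatten
  rw [pvLoopA_eq_rowsB _ trigger.length trigger 0 [] (le_refl _) (by omega),
    pvRowsLoop_eq_rowsB _ trigger trigger.length 0 [] (by omega)]
  rfl
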